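-- pv_equiv track=rewrite | github.com/Mehrads/Brands-Relationships | src/utils.py | normalize_brand_name
-- ===== SOURCE A (Python) =====
-- def normalize_brand_name(name: str) -> str:
--     """
--     Normalize brand name for consistent matching and deduplication.
--
--     Examples:
--     - "Meta Platforms, Inc." → "Meta"
--     - "Apple Inc." → "Apple"
--     - "Amazon Web Services" → "Amazon Web Services" (keep service names)
--     """
--     # Remove common suffixes
--     suffixes = [
--         ' Platforms, Inc.', ' Platforms Inc', ' Platforms',
--         ' Inc.', ' Inc',
--         ' LLC', ' LLC.', ' L.L.C.', ' L.L.C',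
--         ' Corp.', ' Corp', ' Corporation',
--         ' Ltd.', ' Ltd', ' Limited',
--         ' Co.', ' Co', ' Company',
--         ' S.A.', ' SA', ' S.A', ' PLC', ' Plc'
--     ]
--
--     normalized = name.strip()
--
--     # Try suffixes from longest to shortest to avoid partial matches
--     for suffix in sorted(suffixes, key=len, reverse=True):
--         if normalized.endswith(suffix):
--             normalized = normalized[:-len(suffix)].strip()
--             break  # Only remove one suffix
--
--     # Special cases for well-known brands
--     brand_mappings = {
--         'Meta Platforms': 'Meta',
--         'Alphabet Inc': 'Google',  # Alphabet is Google's parent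
--         'X (formerly Twitter)': 'X',
--         'Twitter': 'X',
--         'Amazon Web Services': 'AWS',
--     }
--
--     for variant, canonical in brand_mappings.items():
--         if normalized.lower() == variant.lower():
--             return canonical
--
--     return normalized
-- ===== SOURCE B (Python) =====
-- # Leftmost-cut re-implementation: instead of scanning the suffix list with
-- # endswith, scan the positions of the stripped name left to right and cut at
-- # the first position whose tail is a known suffix (leftmost cut = longest
-- # suffix); aliases are resolved with one lowercase-keyed dict lookup.
--
-- _SUFFIXES = {
--     ' Platforms, Inc.', ' Platforms Inc', ' Platforms',
--     ' Inc.', ' Inc',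
--     ' LLC', ' LLC.', ' L.L.C.', ' L.L.C',
--     ' Corp.', ' Corp', ' Corporation',
--     ' Ltd.', ' Ltd', ' Limited',
--     ' Co.', ' Co', ' Company',
--     ' S.A.', ' SA', ' S.A', ' PLC', ' Plc'
-- }
--
-- _ALIASES = {
--     'meta platforms': 'Meta',
--     'alphabet inc': 'Google',
--     'x (formerly twitter)': 'X',
--     'twitter': 'X',
--     'amazon web services': 'AWS',
-- }
--
--
-- _MAXLEN = max(map(len, _SUFFIXES))
--
--
-- def normalize_brand_name(name: str) -> str:
--     s = name.strip()
--     for i in range(max(0, len(s) - _MAXLEN), len(s)):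
--         if s[i:] in _SUFFIXES:
--             s = s[:i].strip()
--             break
--     return _ALIASES.get(s.lower(), s)
-- ===== Notes on version B (the rewrite author's own statement) =====
-- stated objective: alternative
-- what changed: Replaces A's per-call sort of the suffix list and longest-first endswith scan by a left-to-right scan over the last _MAXLEN positions of the stripped name that cuts at the first position whose tail lies in a precomputed suffix set (leftmost cut = longest suffix), and replaces the case-insensitive alias loop by one lookup in a lowercase-keyed dict.
import Mathlib
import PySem

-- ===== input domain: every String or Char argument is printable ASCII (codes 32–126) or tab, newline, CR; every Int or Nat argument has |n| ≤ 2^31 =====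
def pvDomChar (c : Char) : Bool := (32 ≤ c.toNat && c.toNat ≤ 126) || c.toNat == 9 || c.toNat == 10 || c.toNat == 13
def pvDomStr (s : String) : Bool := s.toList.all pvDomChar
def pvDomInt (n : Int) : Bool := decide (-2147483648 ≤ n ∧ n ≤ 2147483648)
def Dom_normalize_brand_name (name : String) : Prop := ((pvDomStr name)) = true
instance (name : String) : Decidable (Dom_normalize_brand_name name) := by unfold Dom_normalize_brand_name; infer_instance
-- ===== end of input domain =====

-- B replaces A's sort+endswith scan over the suffix list by a leftmost-position scan of the
-- stripped name with a set lookup of the tail, and the alias loop by one lowercase-keyed dict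
-- lookup (objective: alternative, same cost).


-- ===== PORT A =====
def pvSuffixesA : List String :=
  [" Platforms, Inc.", " Platforms Inc", " Platforms",
   " Inc.", " Inc",
   " LLC", " LLC.", " L.L.C.", " L.L.C",
   " Corp.", " Corp", " Corporation",
   " Ltd.", " Ltd", " Limited",
   " Co.", " Co", " Company",
   " S.A.", " SA", " S.A", " PLC", " Plc"]

def pvBrandMappingsA : List (String × String) :=
  [("Meta Platforms", "Meta"),
   ("Alphabet Inc", "Google"),
   ("X (formerly Twitter)", "X"),
   ("Twitter", "X"),
   ("Amazon Web Services", "AWS")]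

-- 'for suffix in sorted(...): if normalized.endswith(suffix): ...; break'
def pvSuffixLoopA : List String → String → String
  | [], normalized => normalized
  | suffix :: rest, normalized =>
    if PySem.Str.endswith normalized suffix then
      PySem.Str.strip (PySem.Str.slice normalized none (some (-(PySem.Str.len suffix))))
    else pvSuffixLoopA rest normalized

-- 'for variant, canonical in brand_mappings.items(): if normalized.lower() == variant.lower(): return canonical'
def pvMappingLoopA : List (String × String) → String → String
  | [], normalized => normalized
  | (variant, canonical) :: rest, normalized =>
    if PySem.Str.lower normalized = PySem.Str.lower variant then canonical
    else pvMappingLoopA rest normalized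

def normalize_brand_name (name : String) : String :=
  let normalized := PySem.Str.strip name
  let normalized :=
    pvSuffixLoopA (PySem.List.sorted pvSuffixesA (fun t => PySem.Str.len t) true) normalized
  pvMappingLoopA pvBrandMappingsA normalized

-- ===== PORT B =====
def pvSuffixSetB : PySem.Set String :=
  PySem.Set.ofList
    [" Platforms, Inc.", " Platforms Inc", " Platforms",
     " Inc.", " Inc",
     " LLC", " LLC.", " L.L.C.", " L.L.C",
     " Corp.", " Corp", " Corporation",
     " Ltd.", " Ltd", " Limited",
     " Co.", " Co", " Company",
     " S.A.", " SA", " S.A", " PLC", " Plc"]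

def pvAliasesB : PySem.Dict String String :=
  PySem.Dict.ofList
    [("meta platforms", "Meta"),
     ("alphabet inc", "Google"),
     ("x (formerly twitter)", "X"),
     ("twitter", "X"),
     ("amazon web services", "AWS")]

-- '_MAXLEN = max(map(len, _SUFFIXES))' — max over the set's lengths is order-independent;
-- Python's max raises on an empty iterable, the set literal is nonempty, so the .getD 0 is never taken
def pvMaxLenB : Int := (PySem.List.max? (pvSuffixSetB.map (fun u => PySem.Str.len u)) (fun x => x)).getD 0

-- 'for i in range(max(0, len(s) - _MAXLEN), len(s)): if s[i:] in _SUFFIXES: s = s[:i].strip(); break'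
def pvPosLoopB (s : String) : List Int → String
  | [] => s
  | i :: rest =>
    if PySem.Set.contains pvSuffixSetB (PySem.Str.slice s (some i) none) then
      PySem.Str.strip (PySem.Str.slice s none (some i))
    else pvPosLoopB s rest

def normalize_brand_name_alt (name : String) : String :=
  let s := PySem.Str.strip name
  let s := pvPosLoopB s
    (PySem.List.pyRange (max 0 (PySem.Str.len s - pvMaxLenB)) (PySem.Str.len s) 1)
  PySem.Dict.getD pvAliasesB (PySem.Str.lower s) s

-- ===== PRECONDITION & SPEC =====
def Spec_normalize_brand_name (name : String) (out : String) : Prop := out = normalize_brand_name_alt name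
instance (name : String) (out : String) : Decidable (Spec_normalize_brand_name name out) := by unfold Spec_normalize_brand_name; infer_instance

-- ===== CLAIM (what is proved, stated in full; the proofs are below) =====
def Claim_equal_normalize_brand_name : Prop := ∀ (name : String), Dom_normalize_brand_name name → Spec_normalize_brand_name name (normalize_brand_name name)

-- ===== LEMMAS AND PROOFS =====

lemma pv_contains_iff (x : String) :
    PySem.Set.contains pvSuffixSetB x = true ↔ x ∈ pvSuffixesA := by
  rw [show pvSuffixSetB = PySem.Set.ofList pvSuffixesA from rfl,
    PySem.Set.contains_iff, PySem.Set.mem_ofList]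

-- the alias step: A's loop over the five (variant, canonical) pairs IS B's lowercase-keyed lookup
lemma pv_alias_eq (n : String) :
    pvMappingLoopA pvBrandMappingsA n = PySem.Dict.getD pvAliasesB (PySem.Str.lower n) n := by
  have hd : pvAliasesB = PySem.Dict.mk
      [("meta platforms", "Meta"), ("alphabet inc", "Google"), ("x (formerly twitter)", "X"),
       ("twitter", "X"), ("amazon web services", "AWS")] := by decide
  have h1 : PySem.Str.lower "Meta Platforms" = "meta platforms" := by decide
  have h2 : PySem.Str.lower "Alphabet Inc" = "alphabet inc" := by decide
  have h3 : PySem.Str.lower "X (formerly Twitter)" = "x (formerly twitter)" := by decide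
  have h4 : PySem.Str.lower "Twitter" = "twitter" := by decide
  have h5 : PySem.Str.lower "Amazon Web Services" = "amazon web services" := by decide
  rw [hd]
  simp only [pvBrandMappingsA, pvMappingLoopA, h1, h2, h3, h4, h5,
    PySem.Dict.getD_eq_get?_getD, PySem.Dict.get?_mk_cons, beq_iff_eq]
  by_cases e1 : PySem.Str.lower n = "meta platforms"
  · simp [e1]
  · by_cases e2 : PySem.Str.lower n = "alphabet inc"
    · simp [e2]
    · by_cases e3 : PySem.Str.lower n = "x (formerly twitter)"
      · simp [e3]
      · by_cases e4 : PySem.Str.lower n = "twitter"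
        · simp [e4]
        · by_cases e5 : PySem.Str.lower n = "amazon web services"
          · simp [e5]
          · simp only [if_neg e1, if_neg e2, if_neg e3, if_neg e4, if_neg e5,
              if_neg (Ne.symm e1), if_neg (Ne.symm e2), if_neg (Ne.symm e3),
              if_neg (Ne.symm e4), if_neg (Ne.symm e5)]
            rfl

-- length of the tail slice s[j:]
lemma pv_slice_from_toList (s : String) (j : Nat) :
    (PySem.Str.slice s (some (j:Int)) none).toList = s.toList.drop j := by
  rw [PySem.Str.toList_slice, PySem.Chars.slice_eq_listSlice, PySem.List.slice_from_natCast]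

-- B's position loop returns s unchanged when no tail from position k on is a known suffix
lemma pv_loopB_none (s : String) (m k : Nat) (hm : m = s.toList.length - k)
    (h : ∀ j : Nat, k ≤ j → j < s.toList.length →
      ¬ PySem.Set.contains pvSuffixSetB (PySem.Str.slice s (some (j:Int)) none) = true) :
    pvPosLoopB s (PySem.List.pyRange (k:Int) (s.toList.length:Int) 1) = s := by
  induction m generalizing k with
  | zero =>
    have hk : (s.toList.length : Int) ≤ (k : Int) := by exact_mod_cast Nat.le_of_sub_eq_zero hm.symm
    rw [PySem.List.pyRange_one_eq_nil hk]
    rfl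
  | succ m ih =>
    have hk : k < s.toList.length := by omega
    rw [PySem.List.pyRange_one_cons (by exact_mod_cast hk)]
    simp only [pvPosLoopB]
    rw [if_neg (h k le_rfl hk)]
    have : ((k : Int) + 1) = ((k + 1 : Nat) : Int) := by push_cast; ring
    rw [this]
    exact ih (k + 1) (by omega) (fun j hj hjl => h j (by omega) hjl)

-- B's position loop cuts at the first position i whose tail is a known suffix
lemma pv_loopB_found (s : String) (i : Nat) (hi : i < s.toList.length)
    (hmem : PySem.Set.contains pvSuffixSetB (PySem.Str.slice s (some (i:Int)) none) = true)
    (m k : Nat) (hm : m = i - k) (hk : k ≤ i)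
    (hmin : ∀ j : Nat, k ≤ j → j < i →
      ¬ PySem.Set.contains pvSuffixSetB (PySem.Str.slice s (some (j:Int)) none) = true) :
    pvPosLoopB s (PySem.List.pyRange (k:Int) (s.toList.length:Int) 1)
      = PySem.Str.strip (PySem.Str.slice s none (some (i:Int))) := by
  induction m generalizing k with
  | zero =>
    have hki : k = i := by omega
    subst hki
    rw [PySem.List.pyRange_one_cons (by exact_mod_cast hi)]
    simp only [pvPosLoopB]
    rw [if_pos hmem]
  | succ m ih =>
    have hki : k < i := by omega
    rw [PySem.List.pyRange_one_cons (by exact_mod_cast (by omega : k < s.toList.length))]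
    simp only [pvPosLoopB]
    rw [if_neg (hmin k le_rfl hki)]
    have : ((k : Int) + 1) = ((k + 1 : Nat) : Int) := by push_cast; ring
    rw [this]
    exact ih (k + 1) (by omega) (by omega) (fun j hj hjl => hmin j (by omega) hjl)

-- the suffix step: A's longest-first suffix scan IS B's leftmost-position scan
lemma pv_loopA_eq (s : String) (L : List String)
    (Hb : L.Pairwise (fun a b => b.toList.length ≤ a.toList.length))
    (Hne : ∀ u ∈ L, 1 ≤ u.toList.length)
    (Hc : ∀ u ∈ L, PySem.Set.contains pvSuffixSetB u = true)
    (H16 : ∀ u ∈ L, u.toList.length ≤ 16)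
    (Ha : ∀ j : Nat, j < s.toList.length →
        PySem.Set.contains pvSuffixSetB (PySem.Str.slice s (some (j:Int)) none) = true →
        PySem.Str.slice s (some (j:Int)) none ∈ L) :
    pvSuffixLoopA L s
      = pvPosLoopB s
          (PySem.List.pyRange ((s.toList.length - 16 : Nat) : Int) (s.toList.length:Int) 1) := by
  induction L with
  | nil =>
    rw [pv_loopB_none s (s.toList.length - (s.toList.length - 16)) (s.toList.length - 16) (by omega)
      (fun j hj hjl hc => by simpa using Ha j hjl hc)]
    rfl
  | cons u rest ih =>
    simp only [pvSuffixLoopA]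
    by_cases he : PySem.Str.endswith s u = true
    · rw [if_pos he]
      have hsfx : u.toList <:+ s.toList := by
        rw [← PySem.Chars.endswith_iff s.toList u.toList, ← PySem.Str.endswith_eq]; exact he
      obtain ⟨t, ht⟩ := hsfx
      have hu1 : 1 ≤ u.toList.length := Hne u (List.mem_cons_self ..)
      have hlen : s.toList.length = t.length + u.toList.length := by
        rw [← ht, List.length_append]
      have hdrop : s.toList.drop t.length = u.toList := by
        rw [← ht, List.drop_left]
      have hslice : PySem.Str.slice s (some ((t.length : Nat) : Int)) none = u := by
        apply String.toList_inj.mp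
        rw [pv_slice_from_toList, hdrop]
      have hmem : PySem.Set.contains pvSuffixSetB
          (PySem.Str.slice s (some ((t.length : Nat) : Int)) none) = true := by
        rw [hslice]; exact Hc u (List.mem_cons_self ..)
      have hmin : ∀ j : Nat, 0 ≤ j → j < t.length →
          ¬ PySem.Set.contains pvSuffixSetB (PySem.Str.slice s (some (j:Int)) none) = true := by
        intro j _ hj hc
        have hmemL := Ha j (by omega) hc
        have hlenj : (PySem.Str.slice s (some (j:Int)) none).toList.length
            = s.toList.length - j := by
          rw [pv_slice_from_toList, List.length_drop]
        rcases List.mem_cons.mp hmemL with h | h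
        · rw [h] at hlenj; omega
        · have hle := (List.pairwise_cons.mp Hb).1 _ h
          omega
      have hu16 : u.toList.length ≤ 16 := H16 u (List.mem_cons_self ..)
      rw [pv_loopB_found s t.length (by omega) hmem (t.length - (s.toList.length - 16))
        (s.toList.length - 16) (by omega) (by omega)
        (fun j _ hji => hmin j (Nat.zero_le _) hji)]
      apply congrArg
      apply String.toList_inj.mp
      rw [PySem.Str.toList_slice, PySem.Str.toList_slice,
        PySem.Chars.slice_eq_listSlice, PySem.Chars.slice_eq_listSlice]
      have hneg : (-(PySem.Str.len u)) = -((u.toList.length : Nat) : Int) := by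
        rw [PySem.Str.len_eq]
      rw [hneg, PySem.List.slice_to_neg_natCast s.toList u.toList.length (by omega),
        PySem.List.slice_to_natCast]
      congr 1
      omega
    · rw [if_neg he]
      refine ih (List.pairwise_cons.mp Hb).2
        (fun v hv => Hne v (List.mem_cons_of_mem _ hv))
        (fun v hv => Hc v (List.mem_cons_of_mem _ hv))
        (fun v hv => H16 v (List.mem_cons_of_mem _ hv)) ?_
      intro j hj hc
      rcases List.mem_cons.mp (Ha j hj hc) with h | h
      · exfalso
        apply he
        rw [PySem.Str.endswith_eq, PySem.Chars.endswith_iff]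
        have : u.toList = s.toList.drop j := by rw [← h, pv_slice_from_toList]
        rw [this]
        exact List.drop_suffix j s.toList
      · exact h

-- ===== VERDICT (by name: the statement is the Claim_ definition above) =====
theorem normalize_brand_name_spec : Claim_equal_normalize_brand_name := by
  intro name _
  unfold Spec_normalize_brand_name normalize_brand_name normalize_brand_name_alt
  have hfacts : ∀ u ∈ pvSuffixesA,
      1 ≤ u.toList.length ∧ PySem.Set.contains pvSuffixSetB u = true
        ∧ u.toList.length ≤ 16 := by decide
  have hs := pv_loopA_eq (PySem.Str.strip name)
      (PySem.List.sorted pvSuffixesA (fun t => PySem.Str.len t) true)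
      (by
        refine (PySem.List.sorted_pairwise_rev pvSuffixesA (fun t => PySem.Str.len t)).imp ?_
        intro a b hab
        have ha := PySem.Str.len_eq a
        have hb := PySem.Str.len_eq b
        simp only [ha, hb] at hab
        exact_mod_cast hab)
      (fun u hu => (hfacts u ((PySem.List.mem_sorted ..).mp hu)).1)
      (fun u hu => (hfacts u ((PySem.List.mem_sorted ..).mp hu)).2.1)
      (fun u hu => (hfacts u ((PySem.List.mem_sorted ..).mp hu)).2.2)
      (fun j hj hc => (PySem.List.mem_sorted ..).mpr ((pv_contains_iff _).mp hc))
  have hml : pvMaxLenB = 16 := by decide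
  simp only [PySem.Str.len_eq] at hs ⊢
  rw [pv_alias_eq, hml,
    show max (0:Int) (((PySem.Str.strip name).toList.length : Int) - 16)
      = (((PySem.Str.strip name).toList.length - 16 : Nat) : Int) from by omega, hs]
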